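-- pv_equiv track=rewrite | github.com/djeada/Nauka-Programowania | src/Python/09_Listy_wprowadzenie/Zad11.py | policzSamochodyV2
-- ===== SOURCE A (Python) =====
-- def policzSamochodyV2(lista):
--     licznik = 0
--     pom = 0
--
--     for x in lista:
--         if x == "A":
--             pom += 1
--
--         elif x == "B":
--             licznik += pom
--
--     return licznik
-- ===== SOURCE B (Python) =====
-- def policzSamochodyV2(lista):
--     # Pair-counting: for each "B" at position j, count the "A"s in the prefix lista[:j].
--     return sum(lista[:j].count("A") for j, x in enumerate(lista) if x == "B")
-- ===== Notes on version B (the rewrite author's own statement) =====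
-- stated objective: alternative
-- what changed: Replaces the single-pass running accumulator (pom/licznik) by explicit pair counting: enumerate positions and, for each 'B', rescan and count the 'A's in the prefix lista[:j], summing these counts.
import Mathlib
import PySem

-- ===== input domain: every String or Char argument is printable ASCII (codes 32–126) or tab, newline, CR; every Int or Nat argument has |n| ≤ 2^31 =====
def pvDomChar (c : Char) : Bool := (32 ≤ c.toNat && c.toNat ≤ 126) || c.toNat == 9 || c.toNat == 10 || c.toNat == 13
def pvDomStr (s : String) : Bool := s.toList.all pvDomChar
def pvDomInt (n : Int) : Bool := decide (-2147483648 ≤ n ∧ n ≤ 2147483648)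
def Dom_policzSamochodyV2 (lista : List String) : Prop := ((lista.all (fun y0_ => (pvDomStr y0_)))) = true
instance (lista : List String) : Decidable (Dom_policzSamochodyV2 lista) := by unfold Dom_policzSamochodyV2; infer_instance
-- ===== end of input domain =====

-- B replaces A's running-accumulator single pass by explicit pair counting (for each "B", count the "A"s in its prefix); alternative algorithm, not faster.


-- ===== PORT A =====
-- single pass: pom counts "A"s seen so far, licznik accumulates pom at each "B"
def policzSamochodyV2 (lista : List String) : Int :=
  (lista.foldl
    (fun (st : Int × Int) x =>
      if x == "A" then (st.1, st.2 + 1)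
      else if x == "B" then (st.1 + st.2, st.2)
      else st)
    (0, 0)).1

-- ===== PORT B =====
-- pair counting: sum over enumerate, for each "B" at j count "A"s in lista[:j]
def policzSamochodyV2_alt (lista : List String) : Int :=
  (PySem.List.enumerate lista).foldl
    (fun (acc : Int) p =>
      if p.2 == "B" then acc + ((PySem.List.slice lista none (some p.1)).count "A" : Int)
      else acc)
    0

-- ===== PRECONDITION & SPEC =====
def Spec_policzSamochodyV2 (lista : List String) (out : Int) : Prop := out = policzSamochodyV2_alt lista
instance (lista : List String) (out : Int) : Decidable (Spec_policzSamochodyV2 lista out) := by unfold Spec_policzSamochodyV2; infer_instance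

-- ===== CLAIM (what is proved, stated in full; the proofs are below) =====
def Claim_equal_policzSamochodyV2 : Prop := ∀ (lista : List String), Dom_policzSamochodyV2 lista → Spec_policzSamochodyV2 lista (policzSamochodyV2 lista)

-- ===== LEMMAS AND PROOFS =====

-- common value: S xs = Σ over each "A" in xs of the number of "B"s after it
def pvS : List String → Int
  | [] => 0
  | x :: xs => (if x == "A" then (xs.count "B" : Int) else 0) + pvS xs

theorem pvA_fold (xs : List String) (l p : Int) :
    (xs.foldl
      (fun (st : Int × Int) x =>
        if x == "A" then (st.1, st.2 + 1)
        else if x == "B" then (st.1 + st.2, st.2)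
        else st)
      (l, p)).1 = l + p * (xs.count "B" : Int) + pvS xs := by
  induction xs generalizing l p with
  | nil => simp [pvS]
  | cons x xs ih =>
    by_cases hA : x == "A"
    · rcases eq_of_beq hA with rfl
      rw [List.foldl_cons, if_pos (by decide : (("A" : String) == "A") = true), ih]
      simp [pvS, List.count_cons]
      push_cast
      ring
    · by_cases hB : x == "B"
      · have : x = "B" := eq_of_beq hB
        subst this
        simp only [List.foldl_cons, hA, if_false, hB, if_true, ih, pvS, List.count_cons]
        simp [hA]
        push_cast
        ring
      · have hxB : ¬ x = "B" := by simpa using hB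
        simp only [List.foldl_cons, hA, if_false, hB, ih, pvS, List.count_cons, hxB]
        simp [hA, hxB]

theorem pvB_fold (xs pre : List String) (acc : Int) :
    (PySem.List.enumerate xs (pre.length : Int)).foldl
      (fun (acc : Int) p =>
        if p.2 == "B" then acc + ((PySem.List.slice (pre ++ xs) none (some p.1)).count "A" : Int)
        else acc)
      acc = acc + (pre.count "A" : Int) * (xs.count "B" : Int) + pvS xs := by
  induction xs generalizing pre acc with
  | nil => simp [PySem.List.enumerate_nil, pvS]
  | cons x xs ih =>
    rw [PySem.List.enumerate_cons]
    have hsl : PySem.List.slice (pre ++ x :: xs) none (some (pre.length : Int)) = pre := by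
      rw [PySem.List.slice_to_natCast]
      simp
    have hlen : ((pre.length : Int) + 1) = (((pre ++ [x]).length : Int)) := by
      simp
    have hlist : pre ++ x :: xs = (pre ++ [x]) ++ xs := by simp
    simp only [List.foldl_cons, hsl, hlen, hlist]
    rw [ih (pre ++ [x])]
    by_cases hA : x == "A"
    · have hx : x = "A" := eq_of_beq hA
      subst hx
      have hne : ¬ ("A" : String) == "B" := by decide
      simp only [hne, if_false, pvS, List.count_append, List.count_cons]
      simp
      push_cast
      ring
    · by_cases hB : x == "B"
      · have hx : x = "B" := eq_of_beq hB
        subst hx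
        simp only [hB, if_true, pvS, List.count_append, List.count_cons]
        simp [hA]
        push_cast
        ring
      · have hxA : ¬ x = "A" := by simpa using hA
        have hxB : ¬ x = "B" := by simpa using hB
        simp only [hB, if_false, pvS, List.count_append, List.count_cons, hxA, hxB]
        simp [hA, hxA, hxB]

-- ===== VERDICT (by name: the statement is the Claim_ definition above) =====
theorem policzSamochodyV2_spec : Claim_equal_policzSamochodyV2 := by
  intro lista _
  unfold Spec_policzSamochodyV2 policzSamochodyV2 policzSamochodyV2_alt
  rw [pvA_fold]
  have := pvB_fold lista [] 0
  simpa using this.symm
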